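-- pv_equiv track=rewrite | github.com/dh-richarddean/pgsanity | pgsanity/sqlprep.py | get_next_occurence
-- ===== SOURCE A (Python) =====
-- def get_next_occurence(haystack, offset, needles):
--     """find next occurence of one of the needles in the haystack
--        return: tuple of (index, needle found)
--            or: None if no needle was found"""
--     # make map of first char to full needle (only works if all needles
--     # have different first characters)
--     firstcharmap = dict([(n[0], n) for n in needles])
--     firstchars = firstcharmap.keys()
--     while offset < len(haystack):
--         if haystack[offset] in firstchars:
--             possible_needle = firstcharmap[haystack[offset]]
--             if haystack[offset:offset + len(possible_needle)] == possible_needle: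
--                 return (offset, possible_needle)
--         offset += 1
--     return None
-- ===== SOURCE B (Python) =====
-- def get_next_occurence(haystack, offset, needles):
--     """find next occurence of one of the needles in the haystack
--        return: tuple of (index, needle found)
--            or: None if no needle was found"""
--     # same dedup-by-first-character map as the original
--     firstcharmap = dict([(n[0], n) for n in needles])
--     best = None
--     for needle in firstcharmap.values():
--         pos = haystack.find(needle, offset)
--         if pos != -1 and (best is None or pos < best[0]):
--             best = (pos, needle)
--     return best
-- ===== Notes on version B (the rewrite author's own statement) =====
-- stated objective: alternative
-- what changed: B replaces A's position-by-position scan of the haystack (dict lookup per character) by one str.find per deduplicated needle followed by a minimum-by-position selection; since the mapped needles have distinct first characters the minimum reproduces A's first hit.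
-- intended difference: On a negative offset where some needle occurs in the haystack, A scans via Python's negative indexing (wrapping to the tail, sometimes returning a negative index, then rescanning the whole string), while B clamps the start like str.find and returns the first occurrence at position >= max(0, len+offset); B's non-negative index of a real occurrence is the intended value. — e.g. on get_next_occurence("abc", -3, ["a"]): A returns some (-3, "a"), B returns some (0, "a")
-- crash fix: On offset < -len(haystack) (with nonempty needles) A raises IndexError from negative indexing; B returns the first occurrence searching from the start of the haystack. — e.g. on get_next_occurence("ab", -5, ["a"]): A raises IndexError, B returns some (0, "a")
import Mathlib
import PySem

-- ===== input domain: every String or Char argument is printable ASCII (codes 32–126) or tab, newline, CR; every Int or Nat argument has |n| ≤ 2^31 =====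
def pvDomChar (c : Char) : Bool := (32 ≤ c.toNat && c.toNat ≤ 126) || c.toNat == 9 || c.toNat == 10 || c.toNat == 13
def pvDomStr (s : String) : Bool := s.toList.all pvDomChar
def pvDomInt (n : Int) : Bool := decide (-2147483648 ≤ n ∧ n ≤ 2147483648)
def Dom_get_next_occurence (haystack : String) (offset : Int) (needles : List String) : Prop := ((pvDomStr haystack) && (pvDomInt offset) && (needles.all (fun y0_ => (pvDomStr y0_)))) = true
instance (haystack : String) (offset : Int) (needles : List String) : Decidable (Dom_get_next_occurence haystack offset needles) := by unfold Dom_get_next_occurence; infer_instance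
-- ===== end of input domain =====

-- B replaces A's position-by-position scan of the haystack by one str.find per (deduplicated)
-- needle followed by a minimum-by-position selection (objective: alternative algorithm).

-- ===== PORT A =====
-- firstcharmap = dict([(n[0], n) for n in needles]); n[0] is the needle's first code point.
-- The ' ' default of headD is never reached under Pre_ (an empty needle is an IndexError, excluded).
def pvBuildMap (needles : List String) : PySem.Dict Char String :=
  needles.foldl (fun d n => d.insert (n.toList.headD ' ') n) PySem.Dict.empty

-- the while-loop of A over the code points of the haystack; fuel counts the remaining
-- iterations ((len - offset).toNat + 1 at the call site is always enough).
-- On offset < -len Python raises IndexError (pyGet? = none); those inputs are outside Pre_.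
def pvLoopA (hay : List Char) (fcm : PySem.Dict Char String) : Nat → Int → Option (Int × String)
  | 0, _ => none
  | fuel + 1, offset =>
    if offset < (hay.length : Int) then
      match PySem.List.pyGet? hay offset with
      | none => none   -- IndexError, outside Pre_
      | some c =>
        if fcm.contains c then                      -- haystack[offset] in firstchars
          match fcm.get? c with
          | some nd =>                              -- possible_needle
            if PySem.List.slice hay (some offset) (some (offset + (nd.toList.length : Int))) = nd.toList
            then some (offset, nd)
            else pvLoopA hay fcm fuel (offset + 1)
          | none => pvLoopA hay fcm fuel (offset + 1)  -- unreachable (contains = true)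
        else pvLoopA hay fcm fuel (offset + 1)
    else none

def get_next_occurence (haystack : String) (offset : Int) (needles : List String) : Option (Int × String) :=
  pvLoopA haystack.toList (pvBuildMap needles) (((haystack.toList.length : Int) - offset).toNat + 1) offset

-- ===== PORT B =====
def get_next_occurence_alt (haystack : String) (offset : Int) (needles : List String) : Option (Int × String) :=
  (pvBuildMap needles).values.foldl
    (fun best nd =>
      let pos := PySem.Str.findFrom haystack nd offset none
      if pos = -1 then best
      else
        match best with
        | none => some (pos, nd)
        | some b => if pos < b.1 then some (pos, nd) else best)
    none

-- ===== PRECONDITION & SPEC =====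
-- Pre_ excludes exactly the inputs where A raises IndexError: an empty needle (n[0]),
-- and offset < -len(haystack) (negative indexing out of range inside the loop).
def Pre_get_next_occurence (haystack : String) (offset : Int) (needles : List String) : Prop :=
  (∀ n ∈ needles, n ≠ "") ∧ -(haystack.toList.length : Int) ≤ offset
instance (haystack : String) (offset : Int) (needles : List String) : Decidable (Pre_get_next_occurence haystack offset needles) := by unfold Pre_get_next_occurence; infer_instance

def pvWitness_get_next_occurence : String × Int × List String := ("ab", 0, ["b"])

-- On a negative offset with some needle occurring in the haystack, A scans via Python's
-- negative indexing (wrapping to the tail, sometimes returning a negative index, then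
-- rescanning the whole string), while B clamps the start the way str.find does and returns
-- the first real occurrence position from max(0, len+offset) — the intended next occurrence.
def D_get_next_occurence (haystack : String) (offset : Int) (needles : List String) : Prop :=
  offset < 0 ∧ ∃ n ∈ needles, PySem.Str.isIn n haystack = true
instance (haystack : String) (offset : Int) (needles : List String) : Decidable (D_get_next_occurence haystack offset needles) := by unfold D_get_next_occurence; infer_instance

def Spec_get_next_occurence (haystack : String) (offset : Int) (needles : List String) (out : Option (Int × String)) : Prop := ¬ D_get_next_occurence haystack offset needles → out = get_next_occurence_alt haystack offset needles
instance (haystack : String) (offset : Int) (needles : List String) (out : Option (Int × String)) : Decidable (Spec_get_next_occurence haystack offset needles out) := by unfold Spec_get_next_occurence; infer_instance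

def pvDiffWitness_get_next_occurence : String × Int × List String := ("abc", -3, ["a"])
def pvDiffWitnessOut_get_next_occurence : (Option (Int × String)) × (Option (Int × String)) :=
  (some (-3, "a"), some (0, "a"))

-- On offset < -len(haystack) (with nonempty needles) A raises IndexError; B returns the
-- first occurrence from the start of the haystack, as str.find's clamping gives.
def Raises_get_next_occurence (haystack : String) (offset : Int) (needles : List String) : Prop :=
  (∀ n ∈ needles, n ≠ "") ∧ offset < -(haystack.toList.length : Int)
instance (haystack : String) (offset : Int) (needles : List String) : Decidable (Raises_get_next_occurence haystack offset needles) := by unfold Raises_get_next_occurence; infer_instance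
def pvRaiseWitness_get_next_occurence : String × Int × List String := ("ab", -5, ["a"])
def pvRaiseWitnessOut_get_next_occurence : Option (Int × String) := some (0, "a")

-- ===== CLAIM (what is proved, stated in full; the proofs are below) =====
def Claim_unchanged_get_next_occurence : Prop := ∀ (haystack : String) (offset : Int) (needles : List String), Dom_get_next_occurence haystack offset needles → Pre_get_next_occurence haystack offset needles → Spec_get_next_occurence haystack offset needles (get_next_occurence haystack offset needles)
def Claim_changed_get_next_occurence : Prop := Dom_get_next_occurence (pvDiffWitness_get_next_occurence.1) (pvDiffWitness_get_next_occurence.2.1) (pvDiffWitness_get_next_occurence.2.2) ∧ Pre_get_next_occurence (pvDiffWitness_get_next_occurence.1) (pvDiffWitness_get_next_occurence.2.1) (pvDiffWitness_get_next_occurence.2.2) ∧ D_get_next_occurence (pvDiffWitness_get_next_occurence.1) (pvDiffWitness_get_next_occurence.2.1) (pvDiffWitness_get_next_occurence.2.2) ∧ get_next_occurence (pvDiffWitness_get_next_occurence.1) (pvDiffWitness_get_next_occurence.2.1) (pvDiffWitness_get_next_occurence.2.2) = pvDiffWitnessOut_get_next_occurence.1 ∧ get_next_occurence_alt (pvDiffWitness_get_next_occurence.1)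 (pvDiffWitness_get_next_occurence.2.1) (pvDiffWitness_get_next_occurence.2.2) = pvDiffWitnessOut_get_next_occurence.2 ∧ pvDiffWitnessOut_get_next_occurence.1 ≠ pvDiffWitnessOut_get_next_occurence.2
def Claim_raises_get_next_occurence : Prop := (∀ (haystack : String) (offset : Int) (needles : List String), Dom_get_next_occurence haystack offset needles → Raises_get_next_occurence haystack offset needles → ¬ Pre_get_next_occurence haystack offset needles) ∧ (Dom_get_next_occurence (pvRaiseWitness_get_next_occurence.1) (pvRaiseWitness_get_next_occurence.2.1) (pvRaiseWitness_get_next_occurence.2.2) ∧ Raises_get_next_occurence (pvRaiseWitness_get_next_occurence.1) (pvRaiseWitness_get_next_occurence.2.1) (pvRaiseWitness_get_next_occurence.2.2) ∧ get_next_occurence_alt (pvRaiseWitness_get_next_occurence.1) (pvRaiseWitness_get_next_occurence.2.1) (pvRaiseWitness_get_next_occurence.2.2) = pvRaiseWitnessOut_get_next_occurence)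

-- ===== LEMMAS AND PROOFS =====



theorem pv_go_nil (sub : List Char) (k : Nat) :
    PySem.Chars.find.go sub [] k = if sub.isEmpty = true then (k : Int) else -1 := rfl

theorem pv_go_cons (sub : List Char) (c : Char) (t : List Char) (k : Nat) :
    PySem.Chars.find.go sub (c :: t) k =
      if sub.isPrefixOf (c :: t) = true then (k : Int) else PySem.Chars.find.go sub t (k + 1) := rfl

theorem pv_go_ge (sub : List Char) : ∀ (s : List Char) (k : Nat),
    PySem.Chars.find.go sub s k = -1 ∨ (k : Int) ≤ PySem.Chars.find.go sub s k := by
  intro s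
  induction s with
  | nil => intro k; rw [pv_go_nil]; split_ifs <;> simp
  | cons c t ih =>
      intro k
      rw [pv_go_cons]
      split_ifs with h
      · right; exact le_refl _
      · rcases ih (k+1) with h1 | h1
        · left; exact h1
        · right; refine le_trans ?_ h1; push_cast; omega

theorem pv_go_succ (sub : List Char) : ∀ (s : List Char) (k : Nat),
    PySem.Chars.find.go sub s (k + 1) =
      if PySem.Chars.find.go sub s k = -1 then -1 else PySem.Chars.find.go sub s k + 1 := by
  intro s
  induction s with
  | nil =>
      intro k
      have hk : ¬ ((k : Int) = -1) := by omega
      by_cases he : sub.isEmpty = true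
      · rw [pv_go_nil, pv_go_nil]
        simp only [he, if_true, hk, if_false]
        push_cast; ring
      · rw [pv_go_nil, pv_go_nil]
        simp [he]
  | cons c t ih =>
      intro k
      have hk : ¬ ((k : Int) = -1) := by omega
      by_cases hp : sub.isPrefixOf (c :: t) = true
      · rw [pv_go_cons, pv_go_cons]
        simp only [hp, if_true, if_neg hk]
        push_cast; ring
      · rw [pv_go_cons, pv_go_cons]
        simp only [hp]
        exact ih (k + 1)

theorem pv_find_ge (s sub : List Char) :
    PySem.Chars.find s sub = -1 ∨ 0 ≤ PySem.Chars.find s sub := by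
  have := pv_go_ge sub s 0
  simpa [PySem.Chars.find] using this

theorem pv_find_cons (sub : List Char) (c : Char) (t : List Char) :
    PySem.Chars.find (c :: t) sub =
      if sub.isPrefixOf (c :: t) = true then 0
      else if PySem.Chars.find t sub = -1 then -1 else PySem.Chars.find t sub + 1 := by
  simp only [PySem.Chars.find]
  rw [pv_go_cons]
  rw [pv_go_succ sub t 0]
  norm_num

theorem pv_find_zero (s sub : List Char) (hne : sub ≠ []) :
    PySem.Chars.find s sub = 0 ↔ sub <+: s := by
  cases s with
  | nil =>
      have h0 : sub.isEmpty = false := by simpa using hne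
      simp only [PySem.Chars.find, pv_go_nil, h0]
      norm_num [List.prefix_nil, hne]
  | cons c t =>
      rw [pv_find_cons]
      by_cases hp : sub.isPrefixOf (c :: t) = true
      · rw [if_pos hp]
        simpa using List.isPrefixOf_iff_prefix.mp hp
      · rw [if_neg hp]
        constructor
        · intro h
          by_cases h1 : PySem.Chars.find t sub = -1
          · exfalso; rw [if_pos h1] at h; omega
          · exfalso; rw [if_neg h1] at h
            rcases pv_find_ge t sub with h3 | h3 <;> omega
        · intro h
          exact absurd (List.isPrefixOf_iff_prefix.mpr h) hp


-- ===== findFrom lemmas =====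

theorem pv_find_nil (sub : List Char) (hne : sub ≠ []) : PySem.Chars.find [] sub = -1 := by
  have h0 : sub.isEmpty = false := by simpa using hne
  simp [PySem.Chars.find, pv_go_nil, h0]

theorem pv_findFrom_nonneg (hay sub : List Char) (off : Int) (h0 : 0 ≤ off)
    (hle : off ≤ (hay.length : Int)) :
    PySem.Chars.findFrom hay sub off none =
      if PySem.Chars.find (hay.drop off.toNat) sub = -1 then -1
      else off + PySem.Chars.find (hay.drop off.toNat) sub := by
  simp only [PySem.Chars.findFrom]
  rw [if_neg (by omega : ¬ off < 0)]
  rw [if_neg (by omega : ¬ ((hay.length : Int) < off))]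
  have h1 : ((hay.length : Int)).toNat = hay.length := by omega
  rw [h1, List.take_length]

theorem pv_findFrom_gt (hay sub : List Char) (off : Int) (h : (hay.length : Int) < off) :
    PySem.Chars.findFrom hay sub off none = -1 := by
  simp only [PySem.Chars.findFrom]
  rw [if_neg (by omega : ¬ off < 0)]
  rw [if_pos h]

theorem pv_findFrom_none (hay sub : List Char) (off : Int) (hni : ¬ sub <:+: hay) :
    PySem.Chars.findFrom hay sub off none = -1 := by
  simp only [PySem.Chars.findFrom]
  split_ifs <;> try rfl
  all_goals {
    exfalso
    apply hni
    exact ((PySem.Chars.find_ne_neg_one_iff _ _).mp (by assumption)).trans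
      (((List.drop_suffix _ _).isInfix).trans ((List.take_prefix _ _).isInfix)) }

-- cand helpers (sub nonempty where needed)
theorem pv_cand_lb (hay sub : List Char) (off : Int) (h0 : 0 ≤ off) (hle : off ≤ (hay.length : Int)) :
    PySem.Chars.findFrom hay sub off none = -1 ∨ off ≤ PySem.Chars.findFrom hay sub off none := by
  rw [pv_findFrom_nonneg hay sub off h0 hle]
  by_cases h : PySem.Chars.find (hay.drop off.toNat) sub = -1
  · left; rw [if_pos h]
  · right; rw [if_neg h]
    rcases pv_find_ge (hay.drop off.toNat) sub with h1 | h1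
    · exact absurd h1 h
    · omega

theorem pv_cand_eq_iff (hay sub : List Char) (off : Int) (h0 : 0 ≤ off)
    (hle : off ≤ (hay.length : Int)) (hne : sub ≠ []) :
    PySem.Chars.findFrom hay sub off none = off ↔ sub <+: hay.drop off.toNat := by
  rw [pv_findFrom_nonneg hay sub off h0 hle]
  rw [← pv_find_zero (hay.drop off.toNat) sub hne]
  by_cases h : PySem.Chars.find (hay.drop off.toNat) sub = -1
  · rw [if_pos h]
    constructor
    · intro hh; omega
    · intro hh; omega
  · rw [if_neg h]
    constructor
    · intro hh; omega
    · intro hh; omega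

theorem pv_cand_step (hay sub : List Char) (off : Int) (h0 : 0 ≤ off)
    (hlt : off < (hay.length : Int)) (_hne : sub ≠ [])
    (hnp : ¬ sub <+: hay.drop off.toNat) :
    PySem.Chars.findFrom hay sub off none = PySem.Chars.findFrom hay sub (off + 1) none := by
  rw [pv_findFrom_nonneg hay sub off h0 (le_of_lt hlt),
      pv_findFrom_nonneg hay sub (off + 1) (by omega) (by omega)]
  have hk : off.toNat < hay.length := by omega
  have h1 : (off + 1).toNat = off.toNat + 1 := by omega
  have hdrop : hay.drop off.toNat = hay[off.toNat] :: hay.drop (off.toNat + 1) :=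
    List.drop_eq_getElem_cons hk
  have hp : ¬ sub.isPrefixOf (hay[off.toNat] :: hay.drop (off.toNat + 1)) = true := by
    rw [List.isPrefixOf_iff_prefix, ← hdrop]; exact hnp
  rw [h1, hdrop, pv_find_cons, if_neg hp]
  by_cases h : PySem.Chars.find (hay.drop (off.toNat + 1)) sub = -1
  · rw [if_pos h, if_pos h, if_pos rfl]
  · rw [if_neg h, if_neg h]
    have : ¬ (PySem.Chars.find (hay.drop (off.toNat + 1)) sub + 1 = -1) := by
      rcases pv_find_ge (hay.drop (off.toNat + 1)) sub with h1 | h1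
      · exact absurd h1 h
      · omega
    rw [if_neg this]
    ring

theorem pv_cand_hit (hay sub : List Char) (off : Int) (h0 : 0 ≤ off)
    (hle : off ≤ (hay.length : Int)) (hne : sub ≠ [])
    (hp : sub <+: hay.drop off.toNat) :
    PySem.Chars.findFrom hay sub off none = off := by
  rw [pv_cand_eq_iff hay sub off h0 hle hne]; exact hp

-- ===== slice lemmas =====

theorem pv_slice_eq_iff (hay sub : List Char) (off : Int) (h0 : 0 ≤ off) :
    PySem.List.slice hay (some off) (some (off + (sub.length : Int))) = sub ↔
      sub <+: hay.drop off.toNat := by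
  rw [PySem.List.slice_toNat hay h0 (by omega)]
  have h1 : (off + (sub.length : Int)).toNat - off.toNat = sub.length := by omega
  rw [h1, List.prefix_iff_eq_take]
  exact eq_comm

theorem pv_slice_infix {α : Type} (xs : List α) (a b : Int) :
    PySem.List.slice xs (some a) (some b) <:+: xs := by
  simp only [PySem.List.slice]
  exact ((List.take_prefix _ _).isInfix).trans ((List.drop_suffix _ _).isInfix)

-- ===== dict lemmas =====

theorem pv_build_items_aux (S : List String) :
    ∀ (L : List String), (∀ n ∈ L, n ∈ S) →
    ∀ (d : PySem.Dict Char String),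
      (∀ p ∈ d.items, p.2 ∈ S ∧ p.1 = p.2.toList.headD ' ') →
      ∀ p ∈ (L.foldl (fun d n => d.insert (n.toList.headD ' ') n) d).items,
        p.2 ∈ S ∧ p.1 = p.2.toList.headD ' ' := by
  intro L
  induction L with
  | nil => intro _ d hd p hp; exact hd p hp
  | cons x L ih =>
      intro hL d hd
      simp only [List.foldl_cons]
      apply ih (fun n hn => hL n (List.mem_cons_of_mem _ hn))
      intro p hp
      rcases (PySem.Dict.mem_items_insert d _ x p).mp hp with h | ⟨h, _⟩
      · subst h; exact ⟨hL x (List.mem_cons_self), rfl⟩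
      · exact hd p h

theorem pv_build_items (needles : List String) :
    ∀ p ∈ (pvBuildMap needles).items, p.2 ∈ needles ∧ p.1 = p.2.toList.headD ' ' := by
  apply pv_build_items_aux needles needles (fun n hn => hn)
  intro p hp
  simp [PySem.Dict.empty] at hp

theorem pv_build_nodup (needles : List String) : (pvBuildMap needles).keys.Nodup :=
  PySem.Dict.nodup_keys_foldl_insert_key needles (fun n => n.toList.headD ' ') (fun _ n => n)
    PySem.Dict.empty PySem.Dict.nodup_keys_empty

theorem pv_values_mem (needles : List String) (v : String)
    (hv : v ∈ (pvBuildMap needles).values) :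
    v ∈ needles ∧ (pvBuildMap needles).get? (v.toList.headD ' ') = some v := by
  rcases List.mem_map.mp hv with ⟨p, hp, hpe⟩
  have h2 := pv_build_items needles p hp
  refine ⟨hpe ▸ h2.1, ?_⟩
  have hpeq : p = (v.toList.headD ' ', v) := by
    rcases p with ⟨k, w⟩
    obtain ⟨-, h22⟩ := h2
    simp only at h22 hpe
    subst hpe
    rw [h22]
  rw [hpeq] at hp
  exact PySem.Dict.get?_of_mem_items _ hp (pv_build_nodup needles)

theorem pv_get?_mem (needles : List String) (c : Char) (v : String)
    (h : (pvBuildMap needles).get? c = some v) :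
    v ∈ (pvBuildMap needles).values ∧ v ∈ needles ∧ c = v.toList.headD ' ' := by
  have hi := PySem.Dict.mem_items_of_get?_eq_some _ h
  have h2 := pv_build_items needles _ hi
  exact ⟨List.mem_map.mpr ⟨(c, v), hi, rfl⟩, h2.1, h2.2⟩

-- head of a nonempty prefix
theorem pv_prefix_head (sub l : List Char) (hne : sub ≠ []) (h : sub <+: l) :
    l.head? = some (sub.headD ' ') := by
  cases sub with
  | nil => exact absurd rfl hne
  | cons c t =>
      rcases h with ⟨r, rfl⟩
      rfl

-- ===== generic fold lemmas for port B's loop =====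

def pvFold (cand : String → Int) : List String → Option (Int × String) → Option (Int × String)
  | [], acc => acc
  | nd :: V, acc =>
      pvFold cand V
        (if cand nd = -1 then acc
         else
           match acc with
           | none => some (cand nd, nd)
           | some b => if cand nd < b.1 then some (cand nd, nd) else acc)

theorem pv_alt_eq (haystack : String) (offset : Int) (needles : List String) :
    get_next_occurence_alt haystack offset needles =
      pvFold (fun nd => PySem.Str.findFrom haystack nd offset none)
        (pvBuildMap needles).values none := by
  unfold get_next_occurence_alt
  generalize (pvBuildMap needles).values = V
  generalize (none : Option (Int × String)) = acc
  induction V generalizing acc with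
  | nil => rfl
  | cons x V ih => simp only [List.foldl_cons, pvFold]; rw [ih]

theorem pvFold_all_neg (cand : String → Int) (V : List String)
    (h : ∀ m ∈ V, cand m = -1) : ∀ acc, pvFold cand V acc = acc := by
  induction V with
  | nil => intro acc; rfl
  | cons x V ih =>
      intro acc
      simp only [pvFold, h x (List.mem_cons_self), if_pos]
      exact ih (fun m hm => h m (List.mem_cons_of_mem _ hm)) acc

theorem pvFold_congr (cand cand' : String → Int) (V : List String)
    (h : ∀ m ∈ V, cand m = cand' m) : ∀ acc, pvFold cand V acc = pvFold cand' V acc := by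
  induction V with
  | nil => intro acc; rfl
  | cons x V ih =>
      intro acc
      simp only [pvFold, h x (List.mem_cons_self)]
      exact ih (fun m hm => h m (List.mem_cons_of_mem _ hm)) _

theorem pvFold_keep (cand : String → Int) (V : List String) (q : Int) (n : String)
    (hlb : ∀ m ∈ V, cand m = -1 ∨ q ≤ cand m) :
    pvFold cand V (some (q, n)) = some (q, n) := by
  induction V with
  | nil => rfl
  | cons x V ih =>
      simp only [pvFold]
      rcases hlb x (List.mem_cons_self) with h | h
      · rw [if_pos h]
        exact ih (fun m hm => hlb m (List.mem_cons_of_mem _ hm))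
      · by_cases hx : cand x = -1
        · rw [if_pos hx]
          exact ih (fun m hm => hlb m (List.mem_cons_of_mem _ hm))
        · rw [if_neg hx]
          have : ¬ (cand x < q) := by omega
          rw [if_neg this]
          exact ih (fun m hm => hlb m (List.mem_cons_of_mem _ hm))

theorem pvFold_min (cand : String → Int) (q : Int) (nstar : String) (h0 : 0 ≤ q) :
    ∀ (V : List String), nstar ∈ V → cand nstar = q →
    (∀ m ∈ V, cand m = -1 ∨ q ≤ cand m) →
    (∀ m ∈ V, cand m = q → m = nstar) →
    ∀ acc, (acc = none ∨ ∃ p n', acc = some (p, n') ∧ q < p) →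
      pvFold cand V acc = some (q, nstar) := by
  intro V
  induction V with
  | nil => intro h; exact absurd h (List.not_mem_nil)
  | cons x V ih =>
      intro hmem hq hlb huniq acc hacc
      by_cases hx : x = nstar
      · subst hx
        have hq1 : ¬ (cand x = -1) := by omega
        rcases hacc with h | ⟨p, n', rfl, hlt⟩
        · subst h
          simp only [pvFold, if_neg hq1]
          rw [hq]
          exact pvFold_keep cand V q x (fun m hm => hlb m (List.mem_cons_of_mem _ hm))
        · simp only [pvFold, if_neg hq1]
          show pvFold cand V (if cand x < p then some (cand x, x) else some (p, n')) = _
          rw [hq, if_pos hlt]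
          exact pvFold_keep cand V q x (fun m hm => hlb m (List.mem_cons_of_mem _ hm))
      · have hmem' : nstar ∈ V := by
          rcases List.mem_cons.mp hmem with h | h
          · exact absurd h.symm hx
          · exact h
        simp only [pvFold]
        by_cases hxneg : cand x = -1
        · rw [if_pos hxneg]
          exact ih hmem' hq (fun m hm => hlb m (List.mem_cons_of_mem _ hm))
            (fun m hm => huniq m (List.mem_cons_of_mem _ hm)) acc hacc
        · rw [if_neg hxneg]
          have hxgt : q < cand x := by
            rcases hlb x (List.mem_cons_self) with h | h
            · exact absurd h hxneg
            · rcases lt_or_eq_of_le h with h2 | h2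
              · exact h2
              · exact absurd (huniq x (List.mem_cons_self) h2.symm) hx
          have hinv : ∀ acc', (acc' = none ∨ ∃ p n', acc' = some (p, n') ∧ q < p) →
              pvFold cand V acc' = some (q, nstar) :=
            fun acc' h' => ih hmem' hq (fun m hm => hlb m (List.mem_cons_of_mem _ hm))
              (fun m hm => huniq m (List.mem_cons_of_mem _ hm)) acc' h'
          rcases hacc with h | ⟨p, n', rfl, hlt⟩
          · subst h
            exact hinv _ (Or.inr ⟨cand x, x, rfl, hxgt⟩)
          · show pvFold cand V (if cand x < p then some (cand x, x) else some (p, n')) = _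
            by_cases hcmp : cand x < p
            · rw [if_pos hcmp]
              exact hinv _ (Or.inr ⟨cand x, x, rfl, hxgt⟩)
            · rw [if_neg hcmp]
              exact hinv _ (Or.inr ⟨p, n', rfl, hlt⟩)

-- ===== A-side loop lemmas =====

theorem pv_loopA_none (hay : List Char) (needles : List String)
    (hno : ∀ v ∈ (pvBuildMap needles).values, ¬ v.toList <:+: hay) :
    ∀ (fuel : Nat) (off : Int), pvLoopA hay (pvBuildMap needles) fuel off = none := by
  intro fuel
  induction fuel with
  | zero => intro off; rfl
  | succ f ih =>
      intro off
      rw [pvLoopA]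
      by_cases hlt : off < (hay.length : Int)
      · rw [if_pos hlt]
        cases hget : PySem.List.pyGet? hay off with
        | none => rfl
        | some c =>
            show (if (pvBuildMap needles).contains c = true then
                match (pvBuildMap needles).get? c with
                | some nd =>
                  if PySem.List.slice hay (some off) (some (off + (nd.toList.length : Int)))
                      = nd.toList
                  then some (off, nd)
                  else pvLoopA hay (pvBuildMap needles) f (off + 1)
                | none => pvLoopA hay (pvBuildMap needles) f (off + 1)
              else pvLoopA hay (pvBuildMap needles) f (off + 1)) = none
            by_cases hc : (pvBuildMap needles).contains c
            · rw [if_pos hc]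
              cases hq : (pvBuildMap needles).get? c with
              | none => exact ih (off + 1)
              | some v =>
                  have hvv := (pv_get?_mem needles c v hq).1
                  have hnsl : ¬ (PySem.List.slice hay (some off)
                      (some (off + (v.toList.length : Int))) = v.toList) := by
                    intro hs
                    exact hno v hvv (hs ▸ pv_slice_infix hay off (off + (v.toList.length : Int)))
                  show (if PySem.List.slice hay (some off)
                      (some (off + (v.toList.length : Int))) = v.toList
                    then some (off, v) else pvLoopA hay (pvBuildMap needles) f (off + 1)) = none
                  rw [if_neg hnsl]
                  exact ih (off + 1)
            · rw [if_neg hc]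
              exact ih (off + 1)
      · rw [if_neg hlt]

theorem pv_fold_none_of_big (haystack : String) (needles : List String) (off : Int)
    (hne : ∀ nd ∈ needles, nd.toList ≠ [])
    (hbig : (haystack.toList.length : Int) ≤ off) :
    pvFold (fun nd => PySem.Str.findFrom haystack nd off none)
      (pvBuildMap needles).values none = none := by
  apply pvFold_all_neg
  intro m hm
  have hmne : m.toList ≠ [] := hne m (pv_values_mem needles m hm).1
  show PySem.Chars.findFrom haystack.toList m.toList off none = -1
  rcases lt_or_eq_of_le hbig with h | h
  · exact pv_findFrom_gt _ _ _ h
  · rw [pv_findFrom_nonneg _ _ _ (by omega) (by omega)]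
    have : haystack.toList.drop off.toNat = [] := by
      apply List.drop_eq_nil_of_le; omega
    rw [this, pv_find_nil _ hmne, if_pos rfl]

theorem pv_main (haystack : String) (needles : List String)
    (hne : ∀ nd ∈ needles, nd.toList ≠ []) :
    ∀ (fuel : Nat) (off : Int), 0 ≤ off → (haystack.toList.length : Int) - off ≤ fuel →
      pvLoopA haystack.toList (pvBuildMap needles) fuel off =
        pvFold (fun nd => PySem.Str.findFrom haystack nd off none)
          (pvBuildMap needles).values none := by
  intro fuel
  induction fuel with
  | zero =>
      intro off h0 hf
      rw [pv_fold_none_of_big haystack needles off hne (by omega)]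
      rfl
  | succ f ih =>
      intro off h0 hf
      set hay := haystack.toList with hhay
      by_cases hlt : off < (hay.length : Int)
      · have hk : off.toNat < hay.length := by omega
        have hget : PySem.List.pyGet? hay off = some hay[off.toNat] :=
          PySem.List.pyGet?_eq_some_getElem hay h0 (by omega)
        by_cases hfit : ∃ v ∈ (pvBuildMap needles).values, v.toList <+: hay.drop off.toNat
        · rcases hfit with ⟨v, hvV, hvp⟩
          rw [pvLoopA, if_pos hlt]
          simp only [hget]
          have hvne : v.toList ≠ [] := hne v (pv_values_mem needles v hvV).1
          have hhead : hay[off.toNat] = v.toList.headD ' ' := by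
            have h1 : (hay.drop off.toNat).head? = some (v.toList.headD ' ') :=
              pv_prefix_head _ _ hvne hvp
            rw [List.head?_drop] at h1
            have h2 : hay[off.toNat]? = some hay[off.toNat] := List.getElem?_eq_getElem hk
            rw [h2] at h1
            exact Option.some.inj h1
          have hq : (pvBuildMap needles).get? hay[off.toNat] = some v := by
            rw [hhead]; exact (pv_values_mem needles v hvV).2
          have hc : (pvBuildMap needles).contains hay[off.toNat] = true := by
            rw [PySem.Dict.contains_eq_isSome_get?, hq]; rfl
          rw [if_pos hc, hq]
          have hs : PySem.List.slice hay (some off) (some (off + (v.toList.length : Int)))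
              = v.toList := (pv_slice_eq_iff hay v.toList off h0).mpr hvp
          show (if PySem.List.slice hay (some off)
              (some (off + (v.toList.length : Int))) = v.toList
            then some (off, v) else pvLoopA hay (pvBuildMap needles) f (off + 1)) = _
          rw [if_pos hs]
          -- B side returns the same hit
          rw [pvFold_min (fun nd => PySem.Str.findFrom haystack nd off none) off v h0
            (pvBuildMap needles).values hvV ?_ ?_ ?_ none (Or.inl rfl)]
          · show PySem.Chars.findFrom hay v.toList off none = off
            exact pv_cand_hit hay v.toList off h0 (by omega) hvne hvp
          · intro m hm
            exact pv_cand_lb hay m.toList off h0 (by omega)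
          · intro m hm hmq
            have hmne : m.toList ≠ [] := hne m (pv_values_mem needles m hm).1
            have hmp : m.toList <+: hay.drop off.toNat :=
              (pv_cand_eq_iff hay m.toList off h0 (by omega) hmne).mp hmq
            have hmhead : hay[off.toNat] = m.toList.headD ' ' := by
              have h1 : (hay.drop off.toNat).head? = some (m.toList.headD ' ') :=
                pv_prefix_head _ _ hmne hmp
              rw [List.head?_drop] at h1
              have h2 : hay[off.toNat]? = some hay[off.toNat] := List.getElem?_eq_getElem hk
              rw [h2] at h1
              exact Option.some.inj h1
            have hqm : (pvBuildMap needles).get? hay[off.toNat] = some m := by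
              rw [hmhead]; exact (pv_values_mem needles m hm).2
            have := hq.symm.trans hqm
            exact (Option.some.inj this).symm ▸ rfl
        · -- no value needle matches at this offset: both sides step to off + 1
          have hstep : pvLoopA hay (pvBuildMap needles) (f + 1) off =
              pvLoopA hay (pvBuildMap needles) f (off + 1) := by
            rw [pvLoopA, if_pos hlt]
            simp only [hget]
            by_cases hc : (pvBuildMap needles).contains hay[off.toNat]
            · rw [if_pos hc]
              cases hq : (pvBuildMap needles).get? hay[off.toNat] with
              | none => rfl
              | some v =>
                  have hvV := (pv_get?_mem needles _ v hq).1
                  have hnsl : ¬ (PySem.List.slice hay (some off)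
                      (some (off + (v.toList.length : Int))) = v.toList) := by
                    intro hs
                    exact hfit ⟨v, hvV, (pv_slice_eq_iff hay v.toList off h0).mp hs⟩
                  show (if PySem.List.slice hay (some off)
                      (some (off + (v.toList.length : Int))) = v.toList
                    then some (off, v) else pvLoopA hay (pvBuildMap needles) f (off + 1))
                    = pvLoopA hay (pvBuildMap needles) f (off + 1)
                  rw [if_neg hnsl]
            · rw [if_neg hc]
          rw [hstep, ih (off + 1) (by omega) (by omega)]
          symm
          apply pvFold_congr
          intro m hm
          have hmne : m.toList ≠ [] := hne m (pv_values_mem needles m hm).1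
          show PySem.Chars.findFrom hay m.toList off none
              = PySem.Chars.findFrom hay m.toList (off + 1) none
          exact pv_cand_step hay m.toList off h0 hlt hmne (fun hp => hfit ⟨m, hm, hp⟩)
      · rw [pvLoopA, if_neg hlt]
        rw [pv_fold_none_of_big haystack needles off hne (by rw [← hhay]; omega)]


-- ===== VERDICT (by name: the statement is the Claim_ definition above) =====
theorem get_next_occurence_spec : Claim_unchanged_get_next_occurence := by
  intro haystack offset needles hdom hpre hnD
  obtain ⟨hne0, hoff⟩ := hpre
  have hne : ∀ nd ∈ needles, nd.toList ≠ [] := by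
    intro nd hnd h
    exact hne0 nd hnd (String.toList_eq_nil_iff.mp h)
  by_cases h0 : 0 ≤ offset
  · unfold get_next_occurence
    rw [pv_main haystack needles hne _ offset h0 (by omega), pv_alt_eq]
  · have hoffneg : offset < 0 := by omega
    have hnocc : ∀ nd ∈ needles, ¬ (nd.toList <:+: haystack.toList) := by
      intro nd hnd hinf
      refine hnD ⟨hoffneg, nd, hnd, ?_⟩
      show (PySem.Chars.find haystack.toList nd.toList != -1) = true
      exact bne_iff_ne.mpr ((PySem.Chars.find_ne_neg_one_iff _ _).mpr hinf)
    unfold get_next_occurence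
    rw [pv_loopA_none haystack.toList needles
        (fun v hv => hnocc v (pv_values_mem needles v hv).1), pv_alt_eq]
    symm
    apply pvFold_all_neg
    intro m hm
    show PySem.Chars.findFrom haystack.toList m.toList offset none = -1
    exact pv_findFrom_none _ _ _ (hnocc m (pv_values_mem needles m hm).1)

theorem get_next_occurence_changed : Claim_changed_get_next_occurence := by
  unfold Claim_changed_get_next_occurence; decide

theorem get_next_occurence_raises : Claim_raises_get_next_occurence := by
  unfold Claim_raises_get_next_occurence
  constructor
  · rintro haystack offset needles _ ⟨_, hr2⟩ ⟨_, hp2⟩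
    omega
  · decide

-- deliberate self-check: B's value at the raise witness, read back off the theorem above
theorem pv_raise_value_ok :
    get_next_occurence_alt (pvRaiseWitness_get_next_occurence.1)
      (pvRaiseWitness_get_next_occurence.2.1) (pvRaiseWitness_get_next_occurence.2.2)
      = pvRaiseWitnessOut_get_next_occurence :=
  get_next_occurence_raises.2.2.2
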